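-- pv_equiv track=rewrite | github.com/Aasthaengg/IBMdataset | Python_codes/p03435/s311602389.py | chech
-- ===== SOURCE A (Python) =====
-- def chech(mylist):
--     result = True
--     b1 = mylist[0][0] - mylist[0][1]
--     c1 = mylist[0][0] - mylist[0][2]
--     for i in range(1, 3):
--         if (mylist[i][0] -  mylist[i][1]) != b1 or (mylist[i][0] -  mylist[i][2]) != c1:
--             result = False
--             break
--     return result
-- ===== SOURCE B (Python) =====
-- def chech(mylist):
--     # build candidate decomposition: row offsets and column offsets
--     a = [mylist[i][0] for i in range(3)]
--     b = [mylist[0][j] - mylist[0][0] for j in range(3)]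
--     for i in range(3):
--         for j in range(3):
--             if mylist[i][j] != a[i] + b[j]:
--                 return False
--     return True
-- ===== Notes on version B (the rewrite author's own statement) =====
-- stated objective: alternative
-- what changed: B builds row offsets a_i and column offsets b_j and verifies grid[i][j] == a_i + b_j over all 9 cells, instead of comparing the two column-difference constants of row 0 against rows 1 and 2.
-- outside the precondition, e.g. on chech([[0, 0, 0], [1, 0, 0], []]): A returns False, B raises IndexError
import Mathlib
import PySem

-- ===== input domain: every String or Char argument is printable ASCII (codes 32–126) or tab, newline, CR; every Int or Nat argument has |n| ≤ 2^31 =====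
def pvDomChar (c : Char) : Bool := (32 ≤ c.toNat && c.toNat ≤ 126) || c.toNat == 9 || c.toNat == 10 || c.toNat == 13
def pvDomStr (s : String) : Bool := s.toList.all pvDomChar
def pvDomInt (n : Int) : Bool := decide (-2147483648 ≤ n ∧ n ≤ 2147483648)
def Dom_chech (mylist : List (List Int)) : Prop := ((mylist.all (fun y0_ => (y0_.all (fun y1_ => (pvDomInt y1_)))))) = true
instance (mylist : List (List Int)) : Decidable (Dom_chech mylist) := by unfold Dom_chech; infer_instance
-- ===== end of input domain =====

-- B builds row offsets a_i and column offsets b_j and verifies grid[i][j] = a_i + b_j over all 9 cells (alternative decomposition, same cost).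


-- mylist[i][j]; exact on inputs satisfying Pre_chech (all accesses are in range there)
def pvCell (mylist : List (List Int)) (i j : Int) : Int :=
  ((PySem.List.pyGet? ((PySem.List.pyGet? mylist i).getD []) j).getD 0)

-- ===== PORT A =====
def chech (mylist : List (List Int)) : Bool :=
  let b1 := pvCell mylist 0 0 - pvCell mylist 0 1
  let c1 := pvCell mylist 0 0 - pvCell mylist 0 2
  -- for i in range(1, 3) with break: state = (result, broken)
  (([1, 2] : List Int).foldl (fun (st : Bool × Bool) i =>
      if st.2 then st
      else if (pvCell mylist i 0 - pvCell mylist i 1) ≠ b1 ∨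
              (pvCell mylist i 0 - pvCell mylist i 2) ≠ c1
      then (false, true) else st) (true, false)).1

-- ===== PORT B =====
def chech_alt (mylist : List (List Int)) : Bool :=
  let a := ([0, 1, 2] : List Int).map (fun i => pvCell mylist i 0)
  let b := ([0, 1, 2] : List Int).map (fun j => pvCell mylist 0 j - pvCell mylist 0 0)
  ([0, 1, 2] : List Int).all (fun i => ([0, 1, 2] : List Int).all (fun j =>
    pvCell mylist i j == (PySem.List.pyGet? a i).getD 0 + (PySem.List.pyGet? b j).getD 0))

-- ===== PRECONDITION & SPEC =====
-- Pre_ excludes inputs on which A's fixed 3×3 index accesses raise IndexError; it also excludes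
-- inputs where row 1 already mismatches but row 2 is too short (A breaks early and returns False
-- while B's natural full scan raises IndexError there).
def Pre_chech (mylist : List (List Int)) : Prop :=
  3 ≤ mylist.length ∧ ∀ r ∈ mylist.take 3, 3 ≤ r.length
instance (mylist : List (List Int)) : Decidable (Pre_chech mylist) := by
  unfold Pre_chech; infer_instance
def pvWitness_chech : List (List Int) := [[1, 2, 3], [2, 3, 4], [3, 4, 5]]

def Spec_chech (mylist : List (List Int)) (out : Bool) : Prop := out = chech_alt mylist
instance (mylist : List (List Int)) (out : Bool) : Decidable (Spec_chech mylist out) := by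
  unfold Spec_chech; infer_instance

-- ===== CLAIM (what is proved, stated in full; the proofs are below) =====
def Claim_equal_chech : Prop :=
  ∀ (mylist : List (List Int)), Dom_chech mylist → Pre_chech mylist → Spec_chech mylist (chech mylist)

-- ===== LEMMAS AND PROOFS =====
theorem len3_decomp {α : Type} (l : List α) (h : 3 ≤ l.length) :
    ∃ a b c t, l = a :: b :: c :: t := by
  match l with
  | a :: b :: c :: t => exact ⟨a, b, c, t, rfl⟩

@[simp] theorem cell_00 (x0 x1 x2 : Int) (t0 : List Int) (r1 r2 : List Int) (t : List (List Int)) :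
    pvCell ((x0::x1::x2::t0)::r1::r2::t) 0 0 = x0 := by
  simp [pvCell, PySem.List.pyGet?_of_nonneg]
@[simp] theorem cell_01 (x0 x1 x2 : Int) (t0 : List Int) (r1 r2 : List Int) (t : List (List Int)) :
    pvCell ((x0::x1::x2::t0)::r1::r2::t) 0 1 = x1 := by
  simp [pvCell, PySem.List.pyGet?_of_nonneg]
@[simp] theorem cell_02 (x0 x1 x2 : Int) (t0 : List Int) (r1 r2 : List Int) (t : List (List Int)) :
    pvCell ((x0::x1::x2::t0)::r1::r2::t) 0 2 = x2 := by
  simp [pvCell, PySem.List.pyGet?_of_nonneg]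
@[simp] theorem cell_10 (x0 x1 x2 : Int) (t0 : List Int) (r0 r2 : List Int) (t : List (List Int)) :
    pvCell (r0::(x0::x1::x2::t0)::r2::t) 1 0 = x0 := by
  simp [pvCell, PySem.List.pyGet?_of_nonneg]
@[simp] theorem cell_11 (x0 x1 x2 : Int) (t0 : List Int) (r0 r2 : List Int) (t : List (List Int)) :
    pvCell (r0::(x0::x1::x2::t0)::r2::t) 1 1 = x1 := by
  simp [pvCell, PySem.List.pyGet?_of_nonneg]
@[simp] theorem cell_12 (x0 x1 x2 : Int) (t0 : List Int) (r0 r2 : List Int) (t : List (List Int)) :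
    pvCell (r0::(x0::x1::x2::t0)::r2::t) 1 2 = x2 := by
  simp [pvCell, PySem.List.pyGet?_of_nonneg]
@[simp] theorem cell_20 (x0 x1 x2 : Int) (t0 : List Int) (r0 r1 : List Int) (t : List (List Int)) :
    pvCell (r0::r1::(x0::x1::x2::t0)::t) 2 0 = x0 := by
  simp [pvCell, PySem.List.pyGet?_of_nonneg]
@[simp] theorem cell_21 (x0 x1 x2 : Int) (t0 : List Int) (r0 r1 : List Int) (t : List (List Int)) :
    pvCell (r0::r1::(x0::x1::x2::t0)::t) 2 1 = x1 := by
  simp [pvCell, PySem.List.pyGet?_of_nonneg]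
@[simp] theorem cell_22 (x0 x1 x2 : Int) (t0 : List Int) (r0 r1 : List Int) (t : List (List Int)) :
    pvCell (r0::r1::(x0::x1::x2::t0)::t) 2 2 = x2 := by
  simp [pvCell, PySem.List.pyGet?_of_nonneg]

-- ===== VERDICT (by name: the statement is the Claim_ definition above) =====
theorem chech_spec : Claim_equal_chech := by
  intro mylist _ hpre
  obtain ⟨hlen, hrows⟩ := hpre
  obtain ⟨r0, r1, r2, t, rfl⟩ := len3_decomp mylist hlen
  have h0 : 3 ≤ r0.length := hrows r0 (by simp)
  have h1 : 3 ≤ r1.length := hrows r1 (by simp)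
  have h2 : 3 ≤ r2.length := hrows r2 (by simp)
  obtain ⟨a0, a1, a2, t0, rfl⟩ := len3_decomp r0 h0
  obtain ⟨b0, b1, b2, t1, rfl⟩ := len3_decomp r1 h1
  obtain ⟨c0, c1, c2, t2, rfl⟩ := len3_decomp r2 h2
  show chech _ = chech_alt _
  rw [Bool.eq_iff_iff]
  simp [chech, chech_alt]
  split_ifs <;> simp_all <;> omega
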